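-- pv_equiv track=rewrite | github.com/clumsy/codechef | src/courses/two-pointers/dsa_prob20.py | largestCommonElement
-- ===== SOURCE A (Python) =====
-- def largestCommonElement(a1, a2):
--     a1.sort()
--     a2.sort()
--     i1, i2 = len(a1) - 1, len(a2) - 1
--     while i1 >= 0 and i2 >= 0:
--         if a1[i1] == a2[i2]:
--             return a1[i1]
--         if a1[i1] > a2[i2]:
--             i1 -= 1
--         else:
--             i2 -= 1
--     return -1
-- ===== SOURCE B (Python) =====
-- def largestCommonElement(a1, a2):
--     # keep A's observable side effect: both lists end up sorted in place
--     a1.sort()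
--     a2.sort()
--     common = set(a1) & set(a2)
--     return max(common) if common else -1
-- ===== Notes on version B (the rewrite author's own statement) =====
-- stated objective: simpler
-- what changed: Replaces the backwards two-pointer merge over both sorted arrays with a set intersection followed by max (falling back to -1 when the intersection is empty); the in-place sorts are kept only for A's observable mutation.
import Mathlib
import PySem

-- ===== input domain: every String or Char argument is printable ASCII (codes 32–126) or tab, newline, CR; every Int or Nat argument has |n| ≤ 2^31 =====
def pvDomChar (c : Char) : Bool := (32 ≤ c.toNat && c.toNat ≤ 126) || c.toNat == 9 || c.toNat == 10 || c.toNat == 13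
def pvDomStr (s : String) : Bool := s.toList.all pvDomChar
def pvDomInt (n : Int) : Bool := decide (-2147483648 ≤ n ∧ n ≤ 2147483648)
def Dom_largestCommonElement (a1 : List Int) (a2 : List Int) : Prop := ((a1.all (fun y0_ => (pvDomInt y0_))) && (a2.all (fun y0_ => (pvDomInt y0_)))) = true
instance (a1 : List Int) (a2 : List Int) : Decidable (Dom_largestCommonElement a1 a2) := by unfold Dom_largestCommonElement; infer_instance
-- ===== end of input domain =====

-- B replaces A's backwards two-pointer merge over the two sorted arrays with a set
-- intersection followed by max (objective: simpler); A sorts both argument lists in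
-- place and B performs the same mutation, so the equivalence proved here is about the
-- return value (the mutation side effects coincide).


-- ===== PORT A =====
-- the while loop: i1, i2 walk down from the ends of the two sorted lists
def lceLoop (s1 s2 : List Int) (i1 i2 : Int) : Int :=
  if h : i1 ≥ 0 ∧ i2 ≥ 0 then
    let x := PySem.List.pyGetD s1 i1 0      -- a1[i1], always in range when read
    let y := PySem.List.pyGetD s2 i2 0      -- a2[i2]
    if x = y then x
    else if x > y then lceLoop s1 s2 (i1 - 1) i2
    else lceLoop s1 s2 i1 (i2 - 1)
  else -1
termination_by (i1 + i2 + 2).toNat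
decreasing_by all_goals omega

def largestCommonElement (a1 : List Int) (a2 : List Int) : Int :=
  let s1 := PySem.List.sorted a1 (fun x => x) false
  let s2 := PySem.List.sorted a2 (fun x => x) false
  lceLoop s1 s2 ((s1.length : Int) - 1) ((s2.length : Int) - 1)

-- ===== PORT B =====
-- (Source B's in-place sorts are mutation only; the returned value is max(set(a1) & set(a2)) or -1)
def largestCommonElement_alt (a1 : List Int) (a2 : List Int) : Int :=
  match PySem.List.max? (PySem.Set.inter (PySem.Set.ofList a1) (PySem.Set.ofList a2)) (fun x => x) with
  | some m => m
  | none => -1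

-- ===== PRECONDITION & SPEC =====
def Spec_largestCommonElement (a1 : List Int) (a2 : List Int) (out : Int) : Prop := out = largestCommonElement_alt a1 a2
instance (a1 : List Int) (a2 : List Int) (out : Int) : Decidable (Spec_largestCommonElement a1 a2 out) := by unfold Spec_largestCommonElement; infer_instance

-- ===== CLAIM (what is proved, stated in full; the proofs are below) =====
def Claim_equal_largestCommonElement : Prop := ∀ (a1 : List Int) (a2 : List Int), Dom_largestCommonElement a1 a2 → Spec_largestCommonElement a1 a2 (largestCommonElement a1 a2)

-- ===== LEMMAS AND PROOFS =====

-- B returns -1 when the two lists have no common element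
theorem alt_eq_neg_one (a1 a2 : List Int)
    (h : ∀ v, v ∈ a1 → v ∈ a2 → False) : largestCommonElement_alt a1 a2 = -1 := by
  unfold largestCommonElement_alt
  have hnil : PySem.Set.inter (PySem.Set.ofList a1) (PySem.Set.ofList a2) = ([] : List Int) := by
    rw [List.eq_nil_iff_forall_not_mem]
    intro v hv
    rw [PySem.Set.mem_inter, PySem.Set.mem_ofList, PySem.Set.mem_ofList] at hv
    exact h v hv.1 hv.2
  rw [hnil]
  simp [PySem.List.max?]

-- B returns the greatest common element when one exists
theorem alt_eq_max (a1 a2 : List Int) (r : Int)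
    (h1 : r ∈ a1) (h2 : r ∈ a2)
    (hmax : ∀ v, v ∈ a1 → v ∈ a2 → v ≤ r) : largestCommonElement_alt a1 a2 = r := by
  unfold largestCommonElement_alt
  have hrmem : r ∈ PySem.Set.inter (PySem.Set.ofList a1) (PySem.Set.ofList a2) := by
    rw [PySem.Set.mem_inter, PySem.Set.mem_ofList, PySem.Set.mem_ofList]
    exact ⟨h1, h2⟩
  have hne : PySem.Set.inter (PySem.Set.ofList a1) (PySem.Set.ofList a2) ≠ ([] : List Int) := by
    intro hnil; rw [hnil] at hrmem; exact absurd hrmem (List.not_mem_nil)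
  rcases Option.ne_none_iff_exists'.1
      (fun hn => hne ((PySem.List.max?_eq_none_iff
        (PySem.Set.inter (PySem.Set.ofList a1) (PySem.Set.ofList a2)) (fun x => x)).1 hn)) with ⟨m, hm⟩
  have hmmem := PySem.List.max?_mem hm
  rw [PySem.Set.mem_inter, PySem.Set.mem_ofList, PySem.Set.mem_ofList] at hmmem
  have h1' : m ≤ r := hmax m hmmem.1 hmmem.2
  have h2' : r ≤ m := PySem.List.max?_isMax hm r hrmem
  simp [hm, le_antisymm h1' h2']

-- in a ≤-sorted list, every element of take (n+1) is ≤ the element at index n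
theorem mem_take_le (l : List Int) (hp : l.Pairwise (· ≤ ·)) (n : Nat) (hn : n < l.length)
    (v : Int) (hv : v ∈ l.take (n + 1)) : v ≤ l[n] := by
  rw [List.mem_take_iff_getElem] at hv
  rcases hv with ⟨j, hj, hvj⟩
  have hjn : j ≤ n := by omega
  rcases Nat.lt_or_ge j n with hlt | hge
  · rw [← hvj]; exact List.pairwise_iff_getElem.1 hp j n (by omega) hn hlt
  · have : j = n := by omega
    subst this; omega

-- an element of take (n+1) that is not l[n] lies in take n
theorem mem_take_of_ne (l : List Int) (n : Nat) (hn : n < l.length)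
    (v : Int) (hv : v ∈ l.take (n + 1)) (hne : v ≠ l[n]) : v ∈ l.take n := by
  rw [List.mem_take_iff_getElem] at hv ⊢
  rcases hv with ⟨j, hj, hvj⟩
  refine ⟨j, ?_, hvj⟩
  rcases Nat.lt_or_ge j n with hlt | hge
  · omega
  · exfalso; apply hne; rw [← hvj]; congr 1; omega

-- main invariant of A's while loop on two ≤-sorted lists
theorem loop_spec (k : Nat) : ∀ (s1 s2 : List Int), s1.Pairwise (· ≤ ·) → s2.Pairwise (· ≤ ·) →
    ∀ (i1 i2 : Int), (i1 + i2 + 2).toNat ≤ k →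
    i1 < (s1.length : Int) → i2 < (s2.length : Int) →
    (∀ v, v ∈ s1 → v ∈ s2 → v ∈ s1.take (i1 + 1).toNat) →
    (∀ v, v ∈ s1 → v ∈ s2 → v ∈ s2.take (i2 + 1).toNat) →
    ((∀ v, v ∈ s1 → v ∈ s2 → False) ∧ lceLoop s1 s2 i1 i2 = -1) ∨
    (lceLoop s1 s2 i1 i2 ∈ s1 ∧ lceLoop s1 s2 i1 i2 ∈ s2 ∧
      ∀ v, v ∈ s1 → v ∈ s2 → v ≤ lceLoop s1 s2 i1 i2) := by
  induction k with
  | zero =>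
    intro s1 s2 hp1 hp2 i1 i2 hk hl1 hl2 hc1 hc2
    -- fuel 0 forces i1 + i2 + 2 ≤ 0, so i1 < 0 or i2 < 0: the loop exits
    left
    rw [lceLoop]
    have hneg : ¬ (i1 ≥ 0 ∧ i2 ≥ 0) := by omega
    rw [dif_neg hneg]
    refine ⟨fun v hv1 hv2 => ?_, rfl⟩
    rcases not_and_or.1 hneg with h | h
    · have := hc1 v hv1 hv2
      have : v ∈ s1.take 0 := by have he : (i1 + 1).toNat = 0 := by omega
                                 rwa [he] at this
      simp at this
    · have := hc2 v hv1 hv2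
      have : v ∈ s2.take 0 := by have he : (i2 + 1).toNat = 0 := by omega
                                 rwa [he] at this
      simp at this
  | succ k ih =>
    intro s1 s2 hp1 hp2 i1 i2 hk hl1 hl2 hc1 hc2
    rw [lceLoop]
    by_cases hpos : i1 ≥ 0 ∧ i2 ≥ 0
    · rw [dif_pos hpos]
      obtain ⟨hi1, hi2⟩ := hpos
      have hg1 : PySem.List.pyGetD s1 i1 0 = s1[i1.toNat] :=
        PySem.List.pyGetD_eq_getElem _ _ hi1 hl1
      have hg2 : PySem.List.pyGetD s2 i2 0 = s2[i2.toNat] :=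
        PySem.List.pyGetD_eq_getElem _ _ hi2 hl2
      have ht1 : (i1 + 1).toNat = i1.toNat + 1 := by omega
      have ht2 : (i2 + 1).toNat = i2.toNat + 1 := by omega
      have hn1 : i1.toNat < s1.length := by omega
      have hn2 : i2.toNat < s2.length := by omega
      simp only [hg1, hg2]
      by_cases heq : s1[i1.toNat] = s2[i2.toNat]
      · rw [if_pos heq]
        right
        refine ⟨List.getElem_mem hn1, heq ▸ List.getElem_mem hn2, fun v hv1 hv2 => ?_⟩
        have := hc1 v hv1 hv2
        rw [ht1] at this
        exact mem_take_le s1 hp1 i1.toNat hn1 v this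
      · rw [if_neg heq]
        by_cases hgt : s1[i1.toNat] > s2[i2.toNat]
        · rw [if_pos hgt]
          -- s1[i1] is not common: every common v is ≤ s2[i2] < s1[i1]
          apply ih s1 s2 hp1 hp2 (i1 - 1) i2 (by omega) (by omega) hl2 ?_ hc2
          intro v hv1 hv2
          have hv2' := hc2 v hv1 hv2
          rw [ht2] at hv2'
          have hvle : v ≤ s2[i2.toNat] := mem_take_le s2 hp2 i2.toNat hn2 v hv2'
          have hv1' := hc1 v hv1 hv2
          rw [ht1] at hv1'
          have he : (i1 - 1 + 1).toNat = i1.toNat := by omega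
          rw [he]
          exact mem_take_of_ne s1 i1.toNat hn1 v hv1' (by omega)
        · rw [if_neg hgt]
          -- s2[i2] is not common: every common v is ≤ s1[i1] < s2[i2]
          apply ih s1 s2 hp1 hp2 i1 (i2 - 1) (by omega) hl1 (by omega) hc1 ?_
          intro v hv1 hv2
          have hv1' := hc1 v hv1 hv2
          rw [ht1] at hv1'
          have hvle : v ≤ s1[i1.toNat] := mem_take_le s1 hp1 i1.toNat hn1 v hv1'
          have hv2' := hc2 v hv1 hv2
          rw [ht2] at hv2'
          have he : (i2 - 1 + 1).toNat = i2.toNat := by omega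
          rw [he]
          have hlt : s1[i1.toNat] < s2[i2.toNat] := by omega
          exact mem_take_of_ne s2 i2.toNat hn2 v hv2' (by omega)
    · rw [dif_neg hpos]
      left
      refine ⟨fun v hv1 hv2 => ?_, rfl⟩
      rcases not_and_or.1 hpos with h | h
      · have := hc1 v hv1 hv2
        have : v ∈ s1.take 0 := by have he : (i1 + 1).toNat = 0 := by omega
                                   rwa [he] at this
        simp at this
      · have := hc2 v hv1 hv2
        have : v ∈ s2.take 0 := by have he : (i2 + 1).toNat = 0 := by omega
                                   rwa [he] at this
        simp at this

-- ===== VERDICT (by name: the statement is the Claim_ definition above) =====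
theorem largestCommonElement_spec : Claim_equal_largestCommonElement := by
  intro a1 a2 _
  unfold Spec_largestCommonElement largestCommonElement
  set s1 := PySem.List.sorted a1 (fun x => x) false with hs1
  set s2 := PySem.List.sorted a2 (fun x => x) false with hs2
  have hp1 : s1.Pairwise (· ≤ ·) := PySem.List.sorted_pairwise a1 (fun x => x)
  have hp2 : s2.Pairwise (· ≤ ·) := PySem.List.sorted_pairwise a2 (fun x => x)
  have hm1 : ∀ v : Int, v ∈ s1 ↔ v ∈ a1 := fun v => PySem.List.mem_sorted a1 (fun x => x) false v
  have hm2 : ∀ v : Int, v ∈ s2 ↔ v ∈ a2 := fun v => PySem.List.mem_sorted a2 (fun x => x) false v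
  have hc1 : ∀ v, v ∈ s1 → v ∈ s2 → v ∈ s1.take ((s1.length : Int) - 1 + 1).toNat := by
    intro v hv _
    have he : ((s1.length : Int) - 1 + 1).toNat = s1.length := by omega
    rw [he, List.take_length]; exact hv
  have hc2 : ∀ v, v ∈ s1 → v ∈ s2 → v ∈ s2.take ((s2.length : Int) - 1 + 1).toNat := by
    intro v _ hv
    have he : ((s2.length : Int) - 1 + 1).toNat = s2.length := by omega
    rw [he, List.take_length]; exact hv
  rcases loop_spec ((s1.length + s2.length) : Nat) s1 s2 hp1 hp2
      ((s1.length : Int) - 1) ((s2.length : Int) - 1) (by omega) (by omega) (by omega)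
      hc1 hc2 with ⟨hnone, hval⟩ | ⟨hr1, hr2, hrmax⟩
  · rw [hval, alt_eq_neg_one a1 a2 (fun v h1 h2 => hnone v ((hm1 v).2 h1) ((hm2 v).2 h2))]
  · exact (alt_eq_max a1 a2 _ ((hm1 _).1 hr1) ((hm2 _).1 hr2)
      (fun v h1 h2 => hrmax v ((hm1 v).2 h1) ((hm2 v).2 h2))).symm
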